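-- pv_equiv track=rewrite | github.com/eddiepiper/Chart_Graph_Interpretation_agent | src/processors/image_processor.py | _extract_statistical_info
-- ===== SOURCE A (Python) =====
-- from typing import Dict, List, Tuple, Any
--
-- def _extract_statistical_info(text_data: List[Dict[str, Any]]) -> Dict[str, Any]:
--     """
--     Extract statistical information from text data.
--
--     Args:
--         text_data: List of dictionaries containing text and positions
--
--     Returns:
--         Dictionary containing statistical information
--     """
--     stats = {
--         'p_value': None,
--         'confidence_interval': None,
--         'hazard_ratio': None,
--         'odds_ratio': None
--     }
--
--     for item in text_data:
--         text = item['text'].lower()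
--
--         # Extract p-value
--         if 'p' in text and ('=' in text or '<' in text or '>' in text):
--             stats['p_value'] = text
--
--         # Extract confidence interval
--         if 'ci' in text or 'confidence interval' in text:
--             stats['confidence_interval'] = text
--
--         # Extract hazard ratio
--         if 'hr' in text or 'hazard ratio' in text:
--             stats['hazard_ratio'] = text
--
--         # Extract odds ratio
--         if 'or' in text or 'odds ratio' in text:
--             stats['odds_ratio'] = text
--
--     return stats
-- ===== SOURCE B (Python) =====
-- def _last_match(text_data, pred):
--     """Last item whose lowercased text satisfies pred, or None."""
--     result = None
--     for item in text_data:
--         text = item['text'].lower()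
--         if pred(text):
--             result = text
--     return result
--
--
-- def _extract_statistical_info(text_data):
--     return {
--         'p_value': _last_match(
--             text_data,
--             lambda t: 'p' in t and ('=' in t or '<' in t or '>' in t)),
--         'confidence_interval': _last_match(
--             text_data,
--             lambda t: 'ci' in t or 'confidence interval' in t),
--         'hazard_ratio': _last_match(
--             text_data,
--             lambda t: 'hr' in t or 'hazard ratio' in t),
--         'odds_ratio': _last_match(
--             text_data,
--             lambda t: 'or' in t or 'odds ratio' in t),
--     }
-- ===== Notes on version B (the rewrite author's own statement) =====
-- stated objective: alternative
-- what changed: Replaced A's single item-major pass maintaining a 4-field dict with a field-major decomposition: a generic _last_match scan over text_data is run once per statistic with that statistic's predicate.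
import Mathlib
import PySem

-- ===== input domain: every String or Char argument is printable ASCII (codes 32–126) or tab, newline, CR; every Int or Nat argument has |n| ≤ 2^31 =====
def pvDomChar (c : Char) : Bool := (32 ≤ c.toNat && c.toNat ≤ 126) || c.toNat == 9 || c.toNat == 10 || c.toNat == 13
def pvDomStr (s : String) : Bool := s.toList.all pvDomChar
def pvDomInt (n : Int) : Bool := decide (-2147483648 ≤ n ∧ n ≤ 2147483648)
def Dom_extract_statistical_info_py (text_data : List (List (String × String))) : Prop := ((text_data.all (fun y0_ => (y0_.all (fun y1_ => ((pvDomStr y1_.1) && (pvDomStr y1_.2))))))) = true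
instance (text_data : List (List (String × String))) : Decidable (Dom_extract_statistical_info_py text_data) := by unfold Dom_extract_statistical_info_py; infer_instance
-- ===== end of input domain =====

-- B is a field-major decomposition (one generic last-match scan per statistic) instead of
-- A's single item-major pass over a 4-field state; same cost, no speed claim.
-- Note: on items lacking a 'text' key Python A raises KeyError (B raises it at the same item);
-- such inputs are excluded by Pre_, and the ports read the lookup with a "" default there.

-- shared helper: item['text'] as first-match association-list lookup (Python dicts have unique keys)
def pvTextOf (item : List (String × String)) : Option String :=
  (item.find? (fun p => p.1 == "text")).map (·.2)

-- ===== PORT A =====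
-- one fold over text_data carrying the four stats fields, branches in source order
def pvStepA (st : Option String × Option String × Option String × Option String)
    (item : List (String × String)) :
    Option String × Option String × Option String × Option String :=
  let text := PySem.Str.lower ((pvTextOf item).getD "")
  let st :=
    if PySem.Str.isIn "p" text &&
        (PySem.Str.isIn "=" text || PySem.Str.isIn "<" text || PySem.Str.isIn ">" text) then
      (some text, st.2.1, st.2.2.1, st.2.2.2) else st
  let st :=
    if PySem.Str.isIn "ci" text || PySem.Str.isIn "confidence interval" text then
      (st.1, some text, st.2.2.1, st.2.2.2) else st
  let st :=
    if PySem.Str.isIn "hr" text || PySem.Str.isIn "hazard ratio" text then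
      (st.1, st.2.1, some text, st.2.2.2) else st
  let st :=
    if PySem.Str.isIn "or" text || PySem.Str.isIn "odds ratio" text then
      (st.1, st.2.1, st.2.2.1, some text) else st
  st

def extract_statistical_info_py (text_data : List (List (String × String))) :
    List (String × Option String) :=
  let st := text_data.foldl pvStepA (none, none, none, none)
  [("p_value", st.1), ("confidence_interval", st.2.1),
   ("hazard_ratio", st.2.2.1), ("odds_ratio", st.2.2.2)]

-- ===== PORT B =====
-- generic last-match scan: last lowercased text satisfying pred, else none
def pvLastMatch (text_data : List (List (String × String))) (pred : String → Bool) :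
    Option String :=
  text_data.foldl
    (fun result item =>
      let text := PySem.Str.lower ((pvTextOf item).getD "")
      if pred text then some text else result)
    none

def extract_statistical_info_py_alt (text_data : List (List (String × String))) :
    List (String × Option String) :=
  [("p_value", pvLastMatch text_data (fun t =>
      PySem.Str.isIn "p" t &&
        (PySem.Str.isIn "=" t || PySem.Str.isIn "<" t || PySem.Str.isIn ">" t))),
   ("confidence_interval", pvLastMatch text_data (fun t =>
      PySem.Str.isIn "ci" t || PySem.Str.isIn "confidence interval" t)),
   ("hazard_ratio", pvLastMatch text_data (fun t =>
      PySem.Str.isIn "hr" t || PySem.Str.isIn "hazard ratio" t)),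
   ("odds_ratio", pvLastMatch text_data (fun t =>
      PySem.Str.isIn "or" t || PySem.Str.isIn "odds ratio" t))]

-- ===== PRECONDITION & SPEC =====
-- Pre_ excludes exactly the inputs where some item has no 'text' key: Python A raises KeyError there.
def Pre_extract_statistical_info_py (text_data : List (List (String × String))) : Prop :=
  (text_data.all (fun item => item.any (fun p => p.1 == "text"))) = true
instance (text_data : List (List (String × String))) : Decidable (Pre_extract_statistical_info_py text_data) := by unfold Pre_extract_statistical_info_py; infer_instance

def pvWitness_extract_statistical_info_py : (List (List (String × String))) :=
  [[("text", "p = 0.05")], [("text", "95% CI 1.2-3.4")]]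

def Spec_extract_statistical_info_py (text_data : List (List (String × String))) (out : List (String × Option String)) : Prop := out = extract_statistical_info_py_alt text_data
instance (text_data : List (List (String × String))) (out : List (String × Option String)) : Decidable (Spec_extract_statistical_info_py text_data out) := by unfold Spec_extract_statistical_info_py; infer_instance

-- ===== CLAIM (what is proved, stated in full; the proofs are below) =====
def Claim_equal_extract_statistical_info_py : Prop := ∀ (text_data : List (List (String × String))), Dom_extract_statistical_info_py text_data → Pre_extract_statistical_info_py text_data → Spec_extract_statistical_info_py text_data (extract_statistical_info_py text_data)

-- ===== LEMMAS AND PROOFS =====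

-- the item-major fold computes the four field-major folds componentwise
theorem foldA_eq_components (td : List (List (String × String)))
    (a b c d : Option String) :
    td.foldl pvStepA (a, b, c, d) =
      (td.foldl (fun r item =>
          let t := PySem.Str.lower ((pvTextOf item).getD "")
          if PySem.Str.isIn "p" t &&
              (PySem.Str.isIn "=" t || PySem.Str.isIn "<" t || PySem.Str.isIn ">" t)
          then some t else r) a,
       td.foldl (fun r item =>
          let t := PySem.Str.lower ((pvTextOf item).getD "")
          if PySem.Str.isIn "ci" t || PySem.Str.isIn "confidence interval" t
          then some t else r) b,
       td.foldl (fun r item =>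
          let t := PySem.Str.lower ((pvTextOf item).getD "")
          if PySem.Str.isIn "hr" t || PySem.Str.isIn "hazard ratio" t
          then some t else r) c,
       td.foldl (fun r item =>
          let t := PySem.Str.lower ((pvTextOf item).getD "")
          if PySem.Str.isIn "or" t || PySem.Str.isIn "odds ratio" t
          then some t else r) d) := by
  induction td generalizing a b c d with
  | nil => rfl
  | cons item rest ih =>
    simp only [List.foldl_cons]
    rw [show pvStepA (a, b, c, d) item =
        (let t := PySem.Str.lower ((pvTextOf item).getD "")
         (if PySem.Str.isIn "p" t &&
              (PySem.Str.isIn "=" t || PySem.Str.isIn "<" t || PySem.Str.isIn ">" t)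
          then some t else a,
          if PySem.Str.isIn "ci" t || PySem.Str.isIn "confidence interval" t
          then some t else b,
          if PySem.Str.isIn "hr" t || PySem.Str.isIn "hazard ratio" t
          then some t else c,
          if PySem.Str.isIn "or" t || PySem.Str.isIn "odds ratio" t
          then some t else d)) from by
      simp only [pvStepA]
      split_ifs <;> rfl]
    exact ih _ _ _ _

-- ===== VERDICT (by name: the statement is the Claim_ definition above) =====
theorem extract_statistical_info_py_spec : Claim_equal_extract_statistical_info_py := by
  intro td _ _
  show extract_statistical_info_py td = extract_statistical_info_py_alt td
  simp only [extract_statistical_info_py, extract_statistical_info_py_alt, pvLastMatch,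
    foldA_eq_components]
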